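-- pv_equiv track=rewrite | github.com/anirudhpillai/algorithms | google_foobar/underground.py | answer_helper
-- ===== SOURCE A (Python) =====
-- from math import factorial
--
-- C_dp = dict()
--
-- answer_helper_dp = dict()
--
-- def C(n, k):
--     if (n, k) in C_dp:
--         return C_dp[(n, k)]
--     d = n - k
--     if d < 0:
--         return 0
--     C_dp[(n, k)] = factorial(n) // factorial(k) // factorial(d)
--     return C_dp[(n, k)]
--
-- def answer_helper(n, k):
--
--     if (n, k) in answer_helper_dp:
--         return answer_helper_dp[(n, k)]
--
--     s = n * (n - 1) // 2
--
--     if k == n - 1: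
--         ret = int(pow(n, (n - 2)))
--     else:
--         ret = C(s, k)
--         for m in range(0, n - 1):
--             temp = 0
--             l = max(0, k - (m + 1) * m // 2)
--             for p in range(l, k - m + 1):
--                 np = (n - 1 - m) * (n - 2 - m) // 2
--                 temp += C(np, p) * answer_helper(m + 1, k - p)
--
--             ret -= C(n - 1, m) * temp
--
--     answer_helper_dp[(n, k)] = ret
--
--     return ret
-- ===== SOURCE B (Python) =====
-- # Bottom-up DP table over (nodes, edges) instead of memoized recursion; math.comb
-- # and integer power instead of factorial quotients and float pow.
-- from math import comb
--
--
-- def _cell(f, i, j):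
--     # number of connected labeled graphs on i nodes with j edges, given rows f[1..i-1]
--     if j == i - 1:
--         return i ** (i - 2) if i >= 2 else 1
--     return comb(i * (i - 1) // 2, j) - sum(
--         comb(i - 1, m) * sum(
--             comb((i - 1 - m) * (i - 2 - m) // 2, p) * f[m + 1][j - p]
--             for p in range(max(0, j - (m + 1) * m // 2), j - m + 1))
--         for m in range(min(i - 1, j + 1)))  # for m > j the p-range is empty
--
--
-- def answer_helper(n, k):
--     if k > n * (n - 1) // 2:
--         return 0  # more edges than there are vertex pairs: no graph at all
--     f = [[0] * (k + 1)]
--     for i in range(1, n + 1):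
--         f.append([_cell(f, i, j) for j in range(k + 1)])
--     return f[n][k]
-- ===== Notes on version B (the rewrite author's own statement) =====
-- stated objective: alternative
-- what changed: Memoized top-down recursion (module-level dict caches, factorial-quotient binomials, float pow) replaced by an explicit bottom-up DP table f[i][j] filled row by row with math.comb and exact integer power; Pre_ admits the natural domain n >= 1, k >= 0 plus degenerate n <= 0 with more edges than vertex pairs (both return 0), excluding inputs where A raises (factorial ValueError for most k < 0, pow ZeroDivisionError at (0,-1)) or returns accidental values of its general branch / float-pow fallback for n <= 0.
-- outside the precondition, e.g. on answer_helper(0, 0): A returns 1, B returns 0; on answer_helper(-3, 2): A returns 15, B raises IndexError; on answer_helper(-1, -2): A returns -1, B raises IndexError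
import Mathlib
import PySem

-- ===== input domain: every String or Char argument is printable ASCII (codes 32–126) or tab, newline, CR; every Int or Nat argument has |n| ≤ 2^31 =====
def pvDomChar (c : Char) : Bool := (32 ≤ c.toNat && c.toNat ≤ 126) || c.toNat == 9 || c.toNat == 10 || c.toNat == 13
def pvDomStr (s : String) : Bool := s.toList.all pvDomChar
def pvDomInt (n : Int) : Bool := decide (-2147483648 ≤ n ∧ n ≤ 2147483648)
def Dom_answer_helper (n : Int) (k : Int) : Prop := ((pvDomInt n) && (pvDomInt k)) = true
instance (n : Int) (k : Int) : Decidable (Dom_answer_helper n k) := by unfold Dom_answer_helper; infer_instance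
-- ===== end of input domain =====

-- B replaces A's memoized recursion by a bottom-up DP table (and factorial-quotient
-- binomials / float pow by math.comb / integer power); return values only, A's module
-- caches are not modelled.

-- ===== PORT A =====
-- int(pow(n, n - 2)): integer power for n ≥ 2; float pow at the negative exponents
-- reached when n ≤ 1: 1.0 at n = 1, -1.0 at n = -1, |x| < 1 truncated to 0 at n ≤ -2;
-- n = 0 raises ZeroDivisionError in Python (outside Pre_, value here irrelevant).
def pyPowInt (n : Int) : Int :=
  if 0 ≤ n - 2 then n ^ (n - 2).toNat
  else if n = 1 then 1
  else if n = -1 then -1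
  else 0

-- A's C(n, k): factorial(n) // factorial(k) // factorial(n - k) after the d < 0 check.
-- Exact for n, k ≥ 0 (every call A makes inside Pre_); Python's factorial raises
-- ValueError on a negative argument (those inputs are outside Pre_).
def pyC (n k : Int) : Int :=
  if n - k < 0 then 0
  else PySem.Int.floordiv
        (PySem.Int.floordiv ((Nat.factorial n.toNat : Nat) : Int) ((Nat.factorial k.toNat : Nat) : Int))
        ((Nat.factorial (n - k).toNat : Nat) : Int)

-- body of A's answer_helper, the recursive call abstracted as `rec`
def ahBody (rec : Int → Int → Int) (n k : Int) : Int :=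
  if k = n - 1 then pyPowInt n
  else
    let s := PySem.Int.floordiv (n * (n - 1)) 2
    (PySem.List.pyRange 0 (n - 1) 1).foldl
      (fun ret m =>
        let l := max 0 (k - PySem.Int.floordiv ((m + 1) * m) 2)
        let temp := (PySem.List.pyRange l (k - m + 1) 1).foldl
          (fun temp p =>
            let np := PySem.Int.floordiv ((n - 1 - m) * (n - 2 - m)) 2
            temp + pyC np p * rec (m + 1) (k - p)) 0
        ret - pyC (n - 1) m * temp)
      (pyC s k)

-- fuel totalisation: fuel = n.toNat suffices (each recursive call lowers n by ≥ 1)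
def ahAF : Nat → Int → Int → Int
  | 0 => ahBody (fun _ _ => 0)
  | fuel + 1 => ahBody (ahAF fuel)

def answer_helper (n : Int) (k : Int) : Int := ahAF n.toNat n k

-- ===== PORT B =====
-- math.comb(n, k): exact for n, k ≥ 0, which covers every call B makes
-- (computed as the falling-factorial quotient with comb's k > n short-circuit)
def icomb (n k : Int) : Int :=
  if n.toNat < k.toNat then 0
  else ((Nat.descFactorial n.toNat k.toNat / Nat.factorial k.toNat : Nat) : Int)

-- f[a][b]; every lookup B performs inside Pre_ is in range (Python would raise
-- IndexError otherwise); rows are Arrays so indexing is O(1) as on a Python list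
def tget (f : List (Array Int)) (a b : Int) : Int :=
  (PySem.List.pyGetD f a #[]).getD b.toNat 0

def ahbCell (f : List (Array Int)) (i j : Int) : Int :=
  if j = i - 1 then (if 2 ≤ i then i ^ (i - 2).toNat else 1)
  else
    icomb (PySem.Int.floordiv (i * (i - 1)) 2) j
      - ((PySem.List.pyRange 0 (min (i - 1) (j + 1)) 1).map (fun m =>
          icomb (i - 1) m *
            ((PySem.List.pyRange (max 0 (j - PySem.Int.floordiv ((m + 1) * m) 2)) (j - m + 1) 1).map
              (fun p => icomb (PySem.Int.floordiv ((i - 1 - m) * (i - 2 - m)) 2) p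
                          * tget f (m + 1) (j - p))).sum)).sum

def answer_helper_alt (n : Int) (k : Int) : Int :=
  if PySem.Int.floordiv (n * (n - 1)) 2 < k then 0
  else
  tget ((PySem.List.pyRange 1 (n + 1) 1).foldl
          (fun f i => f ++ [((PySem.List.pyRange 0 (k + 1) 1).map (ahbCell f i)).toArray])
          [(List.replicate (k + 1).toNat (0 : Int)).toArray])
    n k

-- ===== PRECONDITION & SPEC =====
-- Pre_ admits the function's natural domain n ≥ 1, k ≥ 0, plus the degenerate inputs
-- n ≤ 0 with more edges than vertex pairs (where both programs trivially return 0);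
-- the other inputs are excluded: there A either raises (factorial ValueError for most
-- k < 0, pow(0,-2) ZeroDivisionError at (0,-1)) or returns accidental values of its
-- general branch / float-pow fallback on degenerate node counts n ≤ 0, a corner no
-- caller of a connected-graph counter specifies.
def Pre_answer_helper (n : Int) (k : Int) : Prop :=
  (1 ≤ n ∧ 0 ≤ k) ∨ (n ≤ 0 ∧ PySem.Int.floordiv (n * (n - 1)) 2 < k)
instance (n : Int) (k : Int) : Decidable (Pre_answer_helper n k) := by unfold Pre_answer_helper; infer_instance
def pvWitness_answer_helper : Int × Int := (4, 3)

def Spec_answer_helper (n : Int) (k : Int) (out : Int) : Prop := out = answer_helper_alt n k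
instance (n : Int) (k : Int) (out : Int) : Decidable (Spec_answer_helper n k out) := by unfold Spec_answer_helper; infer_instance

-- ===== CLAIM (what is proved, stated in full; the proofs are below) =====
def Claim_equal_answer_helper : Prop := ∀ (n : Int) (k : Int), Dom_answer_helper n k → Pre_answer_helper n k → Spec_answer_helper n k (answer_helper n k)

-- ===== LEMMAS AND PROOFS =====

theorem sum_map_congr {α : Type} (l : List α) (f g : α → Int) (h : ∀ x ∈ l, f x = g x) :
    (l.map f).sum = (l.map g).sum := by
  rw [List.map_congr_left h]

theorem foldl_sub_map (l : List Int) (g : Int → Int) (b : Int) :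
    l.foldl (fun a x => a - g x) b = b - (l.map g).sum := by
  induction l generalizing b with
  | nil => simp
  | cons x xs ih => simp [ih]; ring

theorem foldl_add_map (l : List Int) (g : Int → Int) (b : Int) :
    l.foldl (fun a x => a + g x) b = b + (l.map g).sum := by
  induction l generalizing b with
  | nil => simp
  | cons x xs ih => simp [ih]; ring

-- ahBody written as subtraction of a sum of sums
theorem ahBody_eq_sum (rec : Int → Int → Int) (n k : Int) :
    ahBody rec n k =
      if k = n - 1 then pyPowInt n
      else
        pyC (PySem.Int.floordiv (n * (n - 1)) 2) k
          - ((PySem.List.pyRange 0 (n - 1) 1).map (fun m =>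
              pyC (n - 1) m *
                ((PySem.List.pyRange (max 0 (k - PySem.Int.floordiv ((m + 1) * m) 2)) (k - m + 1) 1).map
                  (fun p => pyC (PySem.Int.floordiv ((n - 1 - m) * (n - 2 - m)) 2) p
                              * rec (m + 1) (k - p))).sum)).sum := by
  unfold ahBody
  split
  · rfl
  · simp only [foldl_add_map, zero_add, foldl_sub_map]

theorem ahBody_congr (r1 r2 : Int → Int → Int) (n k : Int)
    (h : ∀ m, 0 ≤ m → m < n - 1 → ∀ p, r1 (m + 1) (k - p) = r2 (m + 1) (k - p)) :
    ahBody r1 n k = ahBody r2 n k := by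
  rw [ahBody_eq_sum, ahBody_eq_sum]
  split
  · rfl
  · congr 1
    apply sum_map_congr
    intro m hm
    rw [PySem.List.mem_pyRange_one] at hm
    congr 1
    apply sum_map_congr
    intro p _
    rw [h m hm.1 hm.2 p]

theorem ahAF_stable : ∀ (f1 f2 : Nat) (n k : Int), n ≤ (f1 : Int) + 1 → n ≤ (f2 : Int) + 1 →
    ahAF f1 n k = ahAF f2 n k := by
  intro f1
  induction f1 with
  | zero =>
    intro f2 n k h1 _
    cases f2 with
    | zero => rfl
    | succ g =>
      show ahBody _ n k = ahBody _ n k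
      exact ahBody_congr _ _ n k (fun m hm hm' p => by omega)
  | succ s ih =>
    intro f2 n k h1 h2
    cases f2 with
    | zero =>
      show ahBody _ n k = ahBody _ n k
      exact ahBody_congr _ _ n k (fun m hm hm' p => by omega)
    | succ g =>
      show ahBody _ n k = ahBody _ n k
      apply ahBody_congr
      intro m hm hm' p
      apply ih
      · omega
      · push_cast at h1 h2 ⊢; omega

theorem answer_helper_eq (n k : Int) : answer_helper n k = ahBody answer_helper n k := by
  unfold answer_helper
  rcases Nat.eq_zero_or_eq_succ_pred n.toNat with h | h
  · rw [h]
    show ahBody _ n k = ahBody _ n k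
    apply ahBody_congr
    intro m hm hm' p
    omega
  · rw [h]
    show ahBody _ n k = ahBody _ n k
    apply ahBody_congr
    intro m hm hm' p
    show ahAF (n.toNat - 1) _ _ = ahAF (m + 1).toNat _ _
    apply ahAF_stable
    · omega
    · omega

theorem floordiv_two_nonneg (a : Int) (ha : 0 ≤ a) : 0 ≤ PySem.Int.floordiv a 2 := by
  rw [PySem.Int.floordiv_eq_ediv_of_pos (by omega)]
  exact Int.ediv_nonneg ha (by omega)

theorem icomb_eq_choose (n k : Int) : icomb n k = ((Nat.choose n.toNat k.toNat : Nat) : Int) := by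
  unfold icomb
  split
  · rename_i h
    rw [Nat.choose_eq_zero_of_lt h]
    rfl
  · rw [Nat.choose_eq_descFactorial_div_factorial]

theorem pyC_eq_icomb (n k : Int) (hn : 0 ≤ n) (hk : 0 ≤ k) : pyC n k = icomb n k := by
  rw [icomb_eq_choose]
  unfold pyC
  split
  · rename_i h
    rw [Nat.choose_eq_zero_of_lt (by omega)]
    rfl
  · rename_i h
    rw [PySem.Int.floordiv_natCast, PySem.Int.floordiv_natCast]
    rw [Nat.choose_eq_factorial_div_factorial (show k.toNat ≤ n.toNat by omega)]
    rw [Nat.div_div_eq_div_mul]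
    have hnk : (n - k).toNat = n.toNat - k.toNat := by omega
    rw [hnk]

theorem cell_correct (f : List (Array Int)) (k i j : Int) (hi : 1 ≤ i) (hj : 0 ≤ j) (hjk : j ≤ k)
    (hf : ∀ a b : Int, 1 ≤ a → a ≤ i - 1 → 0 ≤ b → b ≤ k → tget f a b = answer_helper a b) :
    ahbCell f i j = answer_helper i j := by
  rw [answer_helper_eq, ahBody_eq_sum]
  unfold ahbCell
  split
  · -- j = i - 1 shortcut
    unfold pyPowInt
    rcases lt_or_ge i 2 with h2 | h2
    · have : i = 1 := by omega
      subst this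
      norm_num
    · rw [if_pos (by omega), if_pos (by omega)]
  · rw [PySem.List.pyRange_one_append 0 (min (i - 1) (j + 1)) (i - 1) (by omega) (by omega),
        List.map_append, List.sum_append]
    have hz : ((PySem.List.pyRange (min (i - 1) (j + 1)) (i - 1) 1).map (fun m =>
        pyC (i - 1) m *
          ((PySem.List.pyRange (max 0 (j - PySem.Int.floordiv ((m + 1) * m) 2)) (j - m + 1) 1).map
            (fun p => pyC (PySem.Int.floordiv ((i - 1 - m) * (i - 2 - m)) 2) p
                        * answer_helper (m + 1) (j - p))).sum)).sum = 0 := by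
      apply List.sum_eq_zero
      intro x hx
      obtain ⟨m, hm, rfl⟩ := List.mem_map.mp hx
      rw [PySem.List.mem_pyRange_one] at hm
      rw [PySem.List.pyRange_one_eq_nil (le_trans (by omega) (le_max_left 0 _))]
      simp
    rw [hz, add_zero]
    congr 1
    · exact (pyC_eq_icomb _ _ (floordiv_two_nonneg _ (by nlinarith)) hj).symm
    · apply sum_map_congr
      intro m hm
      rw [PySem.List.mem_pyRange_one] at hm
      congr 1
      · exact (pyC_eq_icomb _ _ (by omega) (by omega)).symm
      · apply sum_map_congr
        intro p hp
        rw [PySem.List.mem_pyRange_one] at hp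
        have hp0 : 0 ≤ p := le_trans (le_max_left _ _) hp.1
        have hmi : m ≤ i - 2 := by omega
        congr 1
        · exact (pyC_eq_icomb _ _ (floordiv_two_nonneg _ (by nlinarith [hmi])) hp0).symm
        · exact hf (m + 1) (j - p) (by omega) (by omega) (by omega) (by omega)

-- the step of B's table-building fold
def bstep (k : Int) (f : List (Array Int)) (i : Int) : List (Array Int) :=
  f ++ [((PySem.List.pyRange 0 (k + 1) 1).map (ahbCell f i)).toArray]

theorem toArray_getD (l : List Int) (i : Nat) (d : Int) (h : i < l.length) :
    l.toArray.getD i d = l[i] := by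
  simp [Array.getD, h]

theorem build_inv (k : Int) (_hk : 0 ≤ k) (N : Nat) :
    ((PySem.List.pyRange 1 ((N : Int) + 1) 1).foldl (bstep k) [(List.replicate (k + 1).toNat (0 : Int)).toArray]).length = N + 1 ∧
    ∀ a b : Int, 1 ≤ a → a ≤ (N : Int) → 0 ≤ b → b ≤ k →
      tget ((PySem.List.pyRange 1 ((N : Int) + 1) 1).foldl (bstep k) [(List.replicate (k + 1).toNat (0 : Int)).toArray]) a b
        = answer_helper a b := by
  induction N with
  | zero =>
    constructor
    · rw [PySem.List.pyRange_one_eq_nil (by omega)]; rfl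
    · intro a b ha ha'; omega
  | succ N ih =>
    have hsplit : PySem.List.pyRange 1 ((N + 1 : Nat) : Int) 1 ++ [((N + 1 : Nat) : Int)]
        = PySem.List.pyRange 1 (((N + 1 : Nat) : Int) + 1) 1 := by
      rw [PySem.List.pyRange_one_succ_right (by push_cast; omega)]
    rw [← hsplit, List.foldl_append]
    push_cast at hsplit ⊢
    set fOld := (PySem.List.pyRange 1 ((N : Int) + 1) 1).foldl (bstep k) [(List.replicate (k + 1).toNat (0 : Int)).toArray] with hfOld
    obtain ⟨hlen, hlook⟩ := ih
    have hstep : List.foldl (bstep k) fOld [((N : Int) + 1)]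
        = fOld ++ [((PySem.List.pyRange 0 (k + 1) 1).map (ahbCell fOld ((N : Int) + 1))).toArray] := by
      simp [bstep]
    rw [hstep]
    set row := ((PySem.List.pyRange 0 (k + 1) 1).map (ahbCell fOld ((N : Int) + 1))).toArray with hrow
    constructor
    · simp [hlen]
    · intro a b ha haN hb hbk
      rcases lt_or_ge a ((N : Int) + 1) with hlt | hge
      · -- old rows are unchanged by the append
        unfold tget
        rw [PySem.List.pyGetD_eq_getElem (fOld ++ [row]) #[] (by omega)
              (by push_cast [List.length_append, List.length_singleton, hlen]; omega)]
        rw [List.getElem_append_left (by simp only [hlen]; omega)]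
        have h2 := hlook a b ha (by omega) hb hbk
        unfold tget at h2
        rw [PySem.List.pyGetD_eq_getElem fOld #[] (by omega)
              (by push_cast [hlen]; omega)] at h2
        exact h2
      · -- the new row: a = N + 1
        have haeq : a = (N : Int) + 1 := by omega
        subst haeq
        unfold tget
        rw [PySem.List.pyGetD_eq_getElem (fOld ++ [row]) #[] (by omega)
              (by push_cast [List.length_append, List.length_singleton, hlen]; omega)]
        rw [List.getElem_append_right (by simp only [hlen]; omega)]
        have hidx : ((N : Int) + 1).toNat - fOld.length = 0 := by omega
        simp only [hidx, List.getElem_cons_zero, hrow]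
        rw [toArray_getD _ _ _ (by simp [PySem.List.length_pyRange_one]; omega)]
        rw [List.getElem_map]
        have harg : (PySem.List.pyRange 0 (k + 1) 1)[b.toNat]'(by
            simp [PySem.List.length_pyRange_one]; omega) = b := by
          rw [PySem.List.getElem_pyRange_one]; omega
        rw [harg]
        apply cell_correct fOld k ((N : Int) + 1) b (by omega) hb hbk
        intro a' b' ha' ha'' hb' hb''
        have h3 := hlook a' b' ha' (by omega) hb' hb''
        unfold tget at h3 ⊢
        exact h3

-- x * (x - 1) is even, so its floor-halving is exact
theorem evens (x : Int) : PySem.Int.floordiv (x * (x - 1)) 2 * 2 = x * (x - 1) := by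
  have hev : Even (x * (x - 1)) := by
    have := Int.even_mul_succ_self (x - 1)
    have hx : (x - 1) * (x - 1 + 1) = x * (x - 1) := by ring
    rwa [hx] at this
  have hmod : PySem.Int.mod (x * (x - 1)) 2 = 0 := by
    obtain ⟨c, hc⟩ := hev
    rw [PySem.Int.mod_eq_emod_of_pos (by omega), hc]
    omega
  have := PySem.Int.floordiv_mul_add_mod (x * (x - 1)) 2
  omega

-- with more edges than vertex pairs every term of A's recurrence vanishes
theorem ahBody_zero_of_gt (rec : Int → Int → Int) (n k : Int) (hn : 1 ≤ n)
    (h : PySem.Int.floordiv (n * (n - 1)) 2 < k) : ahBody rec n k = 0 := by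
  have hs := evens n
  rw [ahBody_eq_sum, if_neg (by nlinarith [sq_nonneg (n - 1)])]
  have h1 : pyC (PySem.Int.floordiv (n * (n - 1)) 2) k = 0 := by
    unfold pyC; rw [if_pos (by omega)]
  rw [h1, List.sum_eq_zero, sub_zero]
  intro x hx
  obtain ⟨m, hm, rfl⟩ := List.mem_map.mp hx
  rw [PySem.List.mem_pyRange_one] at hm
  rw [List.sum_eq_zero, mul_zero]
  intro y hy
  obtain ⟨p, hp, rfl⟩ := List.mem_map.mp hy
  rw [PySem.List.mem_pyRange_one] at hp
  have hp1 : k - PySem.Int.floordiv ((m + 1) * m) 2 ≤ p := le_trans (le_max_right _ _) hp.1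
  have hl := evens (m + 1)
  have hnp := evens (n - 1 - m)
  have hml : (m + 1) * (m + 1 - 1) = (m + 1) * m := by ring
  have hnl : (n - 1 - m) * (n - 1 - m - 1) = (n - 1 - m) * (n - 2 - m) := by ring
  rw [hml] at hl
  rw [hnl] at hnp
  have hlt : PySem.Int.floordiv ((n - 1 - m) * (n - 2 - m)) 2 - p < 0 := by
    nlinarith [mul_nonneg hm.1 (show (0:Int) ≤ n - 2 - m by omega)]
  have h0 : pyC (PySem.Int.floordiv ((n - 1 - m) * (n - 2 - m)) 2) p = 0 := by
    unfold pyC; rw [if_pos hlt]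
  rw [h0, zero_mul]

theorem main_eq (n k : Int) (hn : 1 ≤ n) (hk : 0 ≤ k) :
    answer_helper n k = answer_helper_alt n k := by
  unfold answer_helper_alt
  by_cases hks : PySem.Int.floordiv (n * (n - 1)) 2 < k
  · rw [if_pos hks, answer_helper_eq]
    exact ahBody_zero_of_gt _ n k hn hks
  rw [if_neg hks]
  have hN : n = ((n.toNat : Nat) : Int) := by omega
  obtain ⟨_, hlook⟩ := build_inv k hk n.toNat
  rw [hN]
  have := hlook ((n.toNat : Nat) : Int) k (by omega) (by omega) hk le_rfl
  unfold bstep at this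
  rw [← this]

-- ===== VERDICT (by name: the statement is the Claim_ definition above) =====
theorem answer_helper_spec : Claim_equal_answer_helper := by
  intro n k _ hpre
  rcases hpre with ⟨hn, hk⟩ | ⟨hn, hks⟩
  · exact main_eq n k hn hk
  · -- degenerate n ≤ 0 with k beyond the edge count: both sides are 0
    have hs : 0 ≤ PySem.Int.floordiv (n * (n - 1)) 2 :=
      floordiv_two_nonneg _ (by nlinarith)
    show answer_helper n k = answer_helper_alt n k
    unfold answer_helper_alt
    rw [if_pos hks, answer_helper_eq, ahBody_eq_sum, if_neg (by omega)]
    rw [PySem.List.pyRange_one_eq_nil (by omega)]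
    have h0 : pyC (PySem.Int.floordiv (n * (n - 1)) 2) k = 0 := by
      unfold pyC; rw [if_pos (by omega)]
    simp only [List.map_nil, List.sum_nil, sub_zero]
    exact h0
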